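-- pv_equiv track=rewrite | github.com/tqsd/BEC | bec/plots/styles.py | build_color_map
-- ===== SOURCE A (Python) =====
-- from typing import Dict, Iterable, List, Sequence
--
-- def build_color_map(
--     labels: Iterable[str], palette: Sequence[str], offset: int = 0
-- ) -> Dict[str, str]:
--     """
--     Deterministic label->color mapping. Preserves first-seen order.
--     """
--     uniq: List[str] = []
--     seen = set()
--     for x in labels:
--         if x not in seen:
--             uniq.append(x)
--             seen.add(x)
--
--     if not uniq:
--         return {}
--
--     out: Dict[str, str] = {}
--     n = len(palette)
--     for i, lbl in enumerate(uniq):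
--         out[lbl] = palette[(offset + i) % max(n, 1)]
--     return out
-- ===== SOURCE B (Python) =====
-- def build_color_map(labels, palette, offset=0):
--     # Peel-and-filter: repeatedly take the first remaining label, color it with the
--     # next palette slot, and filter all its occurrences out of the rest.  No set,
--     # no membership test: dedup is done by the filtering itself.
--     rest = list(labels)
--     m = max(len(palette), 1)
--     out = {}
--     r = offset
--     while rest:
--         head = rest[0]
--         out[head] = palette[r % m]
--         r += 1
--         rest = [x for x in rest if x != head]
--     return out
-- ===== Notes on version B (the rewrite author's own statement) =====
-- stated objective: alternative
-- what changed: Replaces A's set-based dedup pass plus enumerate-and-assign pass with a peel-and-filter worklist: repeatedly color the first remaining label and filter all its occurrences out of the rest, so no set, no membership test and no enumerate remain (O(n*u) filtering instead of hashing).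
-- outside the precondition, e.g. on build_color_map(['a'], [], 0): A raises IndexError, B raises IndexError
import Mathlib
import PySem

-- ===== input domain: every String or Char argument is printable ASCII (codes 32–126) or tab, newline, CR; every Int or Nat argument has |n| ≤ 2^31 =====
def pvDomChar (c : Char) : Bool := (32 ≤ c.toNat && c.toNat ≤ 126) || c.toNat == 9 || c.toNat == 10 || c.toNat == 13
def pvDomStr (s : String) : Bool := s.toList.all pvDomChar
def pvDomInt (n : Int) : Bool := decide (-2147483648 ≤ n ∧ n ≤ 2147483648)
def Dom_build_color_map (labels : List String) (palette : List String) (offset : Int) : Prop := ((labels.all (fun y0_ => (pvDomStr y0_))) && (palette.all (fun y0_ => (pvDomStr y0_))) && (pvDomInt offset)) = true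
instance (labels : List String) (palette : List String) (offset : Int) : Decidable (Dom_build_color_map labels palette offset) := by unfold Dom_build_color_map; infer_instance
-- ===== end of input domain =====

-- B replaces A's set-based dedup pass + enumerate-and-assign pass by a peel-and-filter
-- worklist (color the first remaining label, filter out its occurrences, repeat);
-- objective: alternative (no set, no membership test, no enumerate).

-- ===== PORT A =====
-- two passes: build uniq/seen, then enumerate uniq into a dict
def build_color_map (labels : List String) (palette : List String) (offset : Int) : List (String × String) :=
  let st := labels.foldl
    (fun (st : List String × PySem.Set String) x =>
      if PySem.Set.contains st.2 x then st else (st.1 ++ [x], PySem.Set.add st.2 x))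
    ([], PySem.Set.empty)
  let uniq := st.1
  if uniq = [] then []
  else
    let n : Int := (palette.length : Int)
    ((PySem.List.enumerate uniq 0).foldl
      (fun (out : PySem.Dict String String) p =>
        -- palette[(offset+i) % max(n,1)]: in range whenever palette ≠ []; Pre_ excludes the
        -- IndexError case (palette = [] with nonempty labels), so the getD default is never used
        out.insert p.2 (PySem.List.pyGetD palette (PySem.Int.mod (offset + p.1) (max n 1)) ""))
      PySem.Dict.empty).items

-- ===== PORT B =====
-- the while-loop: peel the first remaining label, color it, filter it out of the rest
def bcmLoop (palette : List String) (m : Int) :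
    List String → Int → PySem.Dict String String → PySem.Dict String String
  | [], _, out => out
  | head :: rest', r, out =>
      bcmLoop palette m ((head :: rest').filter (fun x => x ≠ head)) (r + 1)
        (out.insert head (PySem.List.pyGetD palette (PySem.Int.mod r m) ""))
termination_by l => l.length
decreasing_by
  have h1 : ((head :: rest').filter (fun x => x ≠ head)).length ≤ rest'.length := by
    have he : (head :: rest').filter (fun x => x ≠ head) =
        rest'.filter (fun x => x ≠ head) := by simp
    rw [he]; exact List.length_filter_le _ _
  simp only [List.length_cons]
  omega

def build_color_map_alt (labels : List String) (palette : List String) (offset : Int) : List (String × String) :=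
  (bcmLoop palette (max (palette.length : Int) 1) labels offset PySem.Dict.empty).items

-- ===== PRECONDITION & SPEC =====
-- Pre_ excludes exactly the inputs where the Python A raises IndexError: an empty palette
-- together with at least one label (B raises the same IndexError there).
def Pre_build_color_map (labels : List String) (palette : List String) (offset : Int) : Prop :=
  labels = [] ∨ palette ≠ []
instance (labels : List String) (palette : List String) (offset : Int) : Decidable (Pre_build_color_map labels palette offset) := by unfold Pre_build_color_map; infer_instance
def pvWitness_build_color_map : List String × List String × Int := (["a", "b", "a", "c"], ["red", "blue"], 1)

def Spec_build_color_map (labels : List String) (palette : List String) (offset : Int) (out : List (String × String)) : Prop := out = build_color_map_alt labels palette offset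
instance (labels : List String) (palette : List String) (offset : Int) (out : List (String × String)) : Decidable (Spec_build_color_map labels palette offset out) := by unfold Spec_build_color_map; infer_instance

-- ===== CLAIM (what is proved, stated in full; the proofs are below) =====
def Claim_equal_build_color_map : Prop := ∀ (labels : List String) (palette : List String) (offset : Int), Dom_build_color_map labels palette offset → Pre_build_color_map labels palette offset → Spec_build_color_map labels palette offset (build_color_map labels palette offset)

-- ===== LEMMAS AND PROOFS =====

-- the color assigned to first-seen index i
def colorOf (palette : List String) (offset : Int) (i : Int) : String :=
  PySem.List.pyGetD palette (PySem.Int.mod (offset + i) (max (palette.length : Int) 1)) ""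

-- the dict holding u's elements mapped to their first-seen colors, as a literal items list
def mkD (palette : List String) (offset : Int) (u : List String) : PySem.Dict String String :=
  PySem.Dict.mk ((PySem.List.enumerate u 0).map (fun p => (p.2, colorOf palette offset p.1)))

theorem mkD_keys (palette : List String) (offset : Int) (u : List String) :
    (mkD palette offset u).keys = u := by
  simp [mkD, PySem.Dict.keys, List.map_map, Function.comp_def,
    PySem.List.map_snd_enumerate]

theorem mkD_snoc (palette : List String) (offset : Int) (u : List String) (x : String)
    (hx : x ∉ u) :
    (mkD palette offset u).insert x (colorOf palette offset (u.length : Int)) =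
      mkD palette offset (u ++ [x]) := by
  apply PySem.Dict.ext
  have hc : (mkD palette offset u).contains x = false := by
    rw [PySem.Dict.contains_eq_decide_mem_keys, mkD_keys]
    simpa using hx
  rw [PySem.Dict.items_insert_of_not_contains _ _ hc]
  simp [mkD, PySem.List.enumerate_append, PySem.List.enumerate, colorOf]

-- A's first loop: the (uniq, seen) pair keeps its two components equal, both being Set.update
theorem fold_uniq_eq (l : List String) (s : List String) :
    l.foldl
      (fun (st : List String × PySem.Set String) x =>
        if PySem.Set.contains st.2 x then st else (st.1 ++ [x], PySem.Set.add st.2 x))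
      (s, s) = (PySem.Set.update s l, PySem.Set.update s l) := by
  induction l generalizing s with
  | nil => simp [PySem.Set.update]
  | cons x t ih =>
    simp only [List.foldl_cons]
    by_cases h : PySem.Set.contains s x = true
    · have hm : x ∈ s := by simpa [PySem.Set.contains] using h
      have hadd : PySem.Set.add s x = s := by
        simp [PySem.Set.add, PySem.Set.contains, hm]
      rw [if_pos h, ih s]
      simp [PySem.Set.update, hadd]
    · have h' : PySem.Set.contains s x = false := by simpa using h
      have hm : x ∉ s := by simpa [PySem.Set.contains] using h
      have hadd : PySem.Set.add s x = s ++ [x] := by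
        simp [PySem.Set.add, PySem.Set.contains, hm]
      rw [if_neg h, hadd, ih (s ++ [x])]
      simp [PySem.Set.update, hadd]

-- A's second loop over a Nodup list builds exactly mkD
theorem fold_enum_eq (palette : List String) (offset : Int) (u : List String) (hu : u.Nodup) :
    (PySem.List.enumerate u 0).foldl
      (fun (out : PySem.Dict String String) p =>
        out.insert p.2 (PySem.List.pyGetD palette
          (PySem.Int.mod (offset + p.1) (max (palette.length : Int) 1)) ""))
      PySem.Dict.empty = mkD palette offset u := by
  apply PySem.Dict.ext
  have hfresh : ∀ a ∈ PySem.List.enumerate u 0,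
      (PySem.Dict.empty : PySem.Dict String String).contains a.2 = false := by
    intro a _; simp [PySem.Dict.contains, PySem.Dict.empty]
  have hnd : ((PySem.List.enumerate u 0).map (fun p => p.2)).Nodup := by
    simpa [PySem.List.map_snd_enumerate] using hu
  have h := PySem.Dict.items_foldl_insert_fresh (PySem.List.enumerate u 0)
    (fun p => p.2)
    (fun p => PySem.List.pyGetD palette
      (PySem.Int.mod (offset + p.1) (max (palette.length : Int) 1)) "")
    PySem.Dict.empty hfresh hnd
  simpa [mkD, PySem.Dict.empty, colorOf] using h

theorem empty_eq_mkD_nil (palette : List String) (offset : Int) :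
    (PySem.Dict.empty : PySem.Dict String String) = mkD palette offset [] := by
  apply PySem.Dict.ext
  simp [mkD, PySem.Dict.empty, PySem.List.enumerate]

-- filtering out an element already in s does not change Set.update
theorem set_update_filter (l : List String) (s : List String) (h : String) (hh : h ∈ s) :
    PySem.Set.update s l = PySem.Set.update s (l.filter (fun x => x ≠ h)) := by
  induction l generalizing s with
  | nil => rfl
  | cons x t ih =>
    by_cases hx : x = h
    · subst hx
      have hadd : PySem.Set.add s x = s := by
        simp [PySem.Set.add, PySem.Set.contains, hh]
      simp [PySem.Set.update, hadd] at *
      simpa [PySem.Set.update] using ih s hh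
    · have hmem : h ∈ PySem.Set.add s x := by
        simp [PySem.Set.add]; split <;> simp [hh]
      simp only [PySem.Set.update, List.foldl_cons, List.filter_cons]
      simp only [hx, decide_not, ne_eq, not_false_eq_true, decide_true]
      simpa [PySem.Set.update] using ih (PySem.Set.add s x) hmem

-- an element absent from l can be pulled out in front of Set.update
theorem set_update_cons_out (l : List String) (s : List String) (h : String) (hh : h ∉ l) :
    PySem.Set.update (h :: s) l = h :: PySem.Set.update s l := by
  induction l generalizing s with
  | nil => rfl
  | cons x t ih =>
    have hxh : x ≠ h := fun e => hh (e ▸ List.mem_cons_self)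
    have hht : h ∉ t := fun m => hh (List.mem_cons_of_mem _ m)
    have hadd : PySem.Set.add (h :: s) x = h :: PySem.Set.add s x := by
      simp [PySem.Set.add, PySem.Set.contains, hxh]
      by_cases hm : x ∈ s <;> simp [hm]
    simp only [PySem.Set.update, List.foldl_cons] at *
    rw [hadd]
    exact ih (PySem.Set.add s x) hht

-- the recursion shape of B on set(labels): peel the head, filter it out
theorem ofList_cons_filter (h : String) (t : List String) :
    PySem.Set.ofList (h :: t) = h :: PySem.Set.ofList (t.filter (fun x => x ≠ h)) := by
  have h1 : PySem.Set.ofList (h :: t) = PySem.Set.update [h] t := by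
    rw [PySem.Set.ofList_eq_foldl]; rfl
  have h2 : PySem.Set.ofList (t.filter (fun x => x ≠ h)) =
      PySem.Set.update [] (t.filter (fun x => x ≠ h)) := by
    rw [PySem.Set.ofList_eq_foldl]; rfl
  have hnm : h ∉ t.filter (fun x => x ≠ h) := by
    intro hm
    have := (List.mem_filter.mp hm).2
    simp at this
  rw [h1, set_update_filter t [h] h (by simp), h2]
  have : ([h] : List String) = h :: ([] : List String) := rfl
  rw [this, set_update_cons_out _ _ _ hnm]

-- invariant of B's loop: having colored u, it produces mkD (u ++ set(l))
theorem bcm_eq (palette : List String) (offset : Int) :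
    ∀ (n : Nat) (l u : List String), l.length ≤ n → (∀ x ∈ l, x ∉ u) →
      bcmLoop palette (max (palette.length : Int) 1) l (offset + (u.length : Int))
        (mkD palette offset u) = mkD palette offset (u ++ PySem.Set.ofList l) := by
  intro n
  induction n with
  | zero =>
    intro l u hl _
    have : l = [] := List.eq_nil_of_length_eq_zero (Nat.le_zero.mp hl)
    subst this
    rw [bcmLoop.eq_def]
    simp [PySem.Set.ofList]
  | succ n ih =>
    intro l u hl hdisj
    cases l with
    | nil =>
      rw [bcmLoop.eq_def]
      simp [PySem.Set.ofList]
    | cons head rest' =>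
      rw [bcmLoop.eq_def]
      dsimp only
      have hmem : head ∉ u := hdisj head List.mem_cons_self
      have hins : (mkD palette offset u).insert head
          (PySem.List.pyGetD palette
            (PySem.Int.mod (offset + (u.length : Int)) (max (palette.length : Int) 1)) "") =
          mkD palette offset (u ++ [head]) := mkD_snoc palette offset u head hmem
      rw [hins]
      have hfl : (head :: rest').filter (fun x => x ≠ head) =
          rest'.filter (fun x => x ≠ head) := by simp
      rw [hfl]
      have hlen : (rest'.filter (fun x => x ≠ head)).length ≤ n := by
        have := List.length_filter_le (fun x => decide (x ≠ head)) rest'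
        simp only [List.length_cons] at hl
        omega
      have hdisj' : ∀ x ∈ rest'.filter (fun x => x ≠ head), x ∉ u ++ [head] := by
        intro x hx
        have hx1 := List.mem_filter.mp hx
        have hx2 : x ≠ head := by simpa using hx1.2
        have hx3 : x ∉ u := hdisj x (List.mem_cons_of_mem _ hx1.1)
        simp [hx2, hx3]
      have hr : offset + (u.length : Int) + 1 = offset + (((u ++ [head]).length : Nat) : Int) := by
        simp; omega
      rw [hr, ih _ _ hlen hdisj']
      rw [ofList_cons_filter]
      simp

-- ===== VERDICT (by name: the statement is the Claim_ definition above) =====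
theorem build_color_map_spec : Claim_equal_build_color_map := by
  intro labels palette offset _ _
  unfold Spec_build_color_map
  simp only [build_color_map, build_color_map_alt]
  simp only [PySem.Set.empty]
  rw [fold_uniq_eq labels ([] : List String)]
  have hupd : PySem.Set.update ([] : List String) labels = PySem.Set.ofList labels := by
    rw [PySem.Set.ofList_eq_foldl]; rfl
  rw [hupd]
  dsimp only
  have halt := bcm_eq palette offset labels.length labels [] le_rfl (by simp)
  rw [List.nil_append] at halt
  norm_num at halt
  have halt2 : bcmLoop palette (max (palette.length : Int) 1) labels offset PySem.Dict.empty =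
      mkD palette offset (PySem.Set.ofList labels) := by
    rw [empty_eq_mkD_nil palette offset]; exact halt
  rw [halt2]
  by_cases hnil : PySem.Set.ofList labels = []
  · rw [if_pos hnil, hnil]
    simp [mkD, PySem.List.enumerate]
  · rw [if_neg hnil]
    rw [fold_enum_eq palette offset _ (PySem.Set.nodup_ofList labels)]
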